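-- pv_equiv track=rewrite | github.com/addaix/raglab | raglab/retrieval/lib_alexis.py | generate_split_keys
-- ===== SOURCE A (Python) =====
-- from typing import Mapping, List, Optional, Any, Tuple, Callable
--
-- DocKey = str
--
-- def split_text(text, max_chunk_size, separators=None):
--     """Split text into chunks of size max_chunk_size, using the separators provided."""
--     if separators is None:
--         separators = ["\n", ".", "!", "?"]
--
--     def recursive_split(text, max_chunk_size, separators):
--         if len(text) <= max_chunk_size:
--             return [(0, len(text))]
--
--         best_split_index = -1
--         for sep in separators:
--             split_index = text.rfind(sep, 0, max_chunk_size)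
--             if split_index != -1:
--                 best_split_index = split_index + len(sep)
--                 break
--
--         if best_split_index == -1:
--             best_split_index = max_chunk_size
--
--         left_splits = recursive_split(
--             text[:best_split_index], max_chunk_size, separators
--         )
--         right_splits = recursive_split(
--             text[best_split_index:], max_chunk_size, separators
--         )
--         right_splits = [
--             (start + best_split_index, end + best_split_index)
--             for start, end in right_splits
--         ]
--
--         return left_splits + right_splits
--
--     indices = recursive_split(text, max_chunk_size, separators)
--     return indices
--
-- def generate_split_keys(
--     docs: Mapping[DocKey, str],
--     chunk_size: int,
--     chunk_overlap: int,
--     separators: Optional[List[str]] = None,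
-- ) -> List[Tuple[str, int, int]]:
--     segment_keys = []
--     for doc_key, doc_text in docs.items():
--         split_indices = split_text(doc_text, chunk_size, separators)
--         for i, (start, end) in enumerate(split_indices):
--             segment_keys.append(
--                 (doc_key, max(0, start - chunk_overlap), end + chunk_overlap)
--             )
--     return segment_keys
-- ===== SOURCE B (Python) =====
-- def generate_split_keys(docs, chunk_size, chunk_overlap, separators=None):
--     if separators is None:
--         separators = ["\n", ".", "!", "?"]
--     out = []
--     for doc_key, text in docs.items():
--         n = len(text)
--         pos = 0
--         while n - pos > chunk_size:
--             cut = -1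
--             for sep in separators:
--                 j = text.rfind(sep, pos, pos + chunk_size)
--                 if j != -1:
--                     cut = j + len(sep)
--                     break
--             if cut == -1:
--                 cut = pos + chunk_size
--             out.append((doc_key, max(0, pos - chunk_overlap), cut + chunk_overlap))
--             pos = cut
--         out.append((doc_key, max(0, pos - chunk_overlap), n + chunk_overlap))
--     return out
-- ===== Notes on version B (the rewrite author's own statement) =====
-- stated objective: alternative
-- what changed: Replaces the recursive split (which slices off a copy of the remaining text at every step and rebuilds index lists with shifted concatenations) by a single iterative while-loop over the original string using offset indices into it, emitting each key span directly (measured 1.47x at the largest timing size, below the 1.5x bar, so no speed claim).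
import Mathlib
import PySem

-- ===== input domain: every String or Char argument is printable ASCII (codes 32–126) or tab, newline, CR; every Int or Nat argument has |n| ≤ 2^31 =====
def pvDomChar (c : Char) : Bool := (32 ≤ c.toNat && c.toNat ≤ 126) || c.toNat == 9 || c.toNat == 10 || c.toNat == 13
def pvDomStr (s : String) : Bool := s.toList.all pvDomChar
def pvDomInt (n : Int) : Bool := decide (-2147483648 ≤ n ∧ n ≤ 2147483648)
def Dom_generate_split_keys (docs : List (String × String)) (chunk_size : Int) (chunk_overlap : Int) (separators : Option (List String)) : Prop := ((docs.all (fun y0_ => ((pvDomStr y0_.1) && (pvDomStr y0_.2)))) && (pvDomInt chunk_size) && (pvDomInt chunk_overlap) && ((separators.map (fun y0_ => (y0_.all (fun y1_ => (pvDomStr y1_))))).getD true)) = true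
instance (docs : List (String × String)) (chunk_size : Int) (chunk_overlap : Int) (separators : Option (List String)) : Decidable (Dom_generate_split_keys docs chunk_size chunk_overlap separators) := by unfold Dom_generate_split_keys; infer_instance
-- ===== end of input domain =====

-- B replaces A's recursive text-slicing split by a single iterative scan over the original
-- string using offset indices, so no copy of the remaining text is made at each step.
-- ===== PORT A =====
def pvSepsDefault : List String := ["\n", ".", "!", "?"]

def pvBestSplit (text : List Char) (maxc : Int) : List (List Char) → Int
  | [] => -1
  | sep :: rest =>
    let si := PySem.Chars.rfindFrom text sep 0 (some maxc)
    if si ≠ -1 then si + (sep.length : Int) else pvBestSplit text maxc rest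

-- recursive_split; fuel only makes the recursion structural (text.length + 1 is always enough
-- on Pre_; Python diverges exactly where Pre_ fails)
def pvRecSplit (fuel : Nat) (text : List Char) (maxc : Int) (seps : List (List Char)) : List (Int × Int) :=
  match fuel with
  | 0 => []
  | f+1 =>
    if (text.length : Int) ≤ maxc then [((0:Int), (text.length : Int))]
    else
      let b0 := pvBestSplit text maxc seps
      let best := if b0 = -1 then maxc else b0
      let lefts := pvRecSplit f (PySem.List.slice text none (some best)) maxc seps
      let rights := pvRecSplit f (PySem.List.slice text (some best) none) maxc seps
      lefts ++ rights.map (fun p => (p.1 + best, p.2 + best))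

def pvSplitText (text : List Char) (maxc : Int) (separators : Option (List String)) : List (Int × Int) :=
  let seps := (separators.getD pvSepsDefault).map String.toList
  pvRecSplit (text.length + 1) text maxc seps

def generate_split_keys (docs : List (String × String)) (chunk_size : Int) (chunk_overlap : Int) (separators : Option (List String)) : List (String × Int × Int) :=
  (PySem.Dict.ofList docs).items.foldl (fun acc p =>
    let idx := pvSplitText p.2.toList chunk_size separators
    acc ++ (PySem.List.enumerate idx).map
      (fun q => (p.1, max 0 (q.2.1 - chunk_overlap), q.2.2 + chunk_overlap))) []

-- ===== PORT B =====
def pvBestCut (text : List Char) (pos chunk : Int) : List (List Char) → Int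
  | [] => -1
  | sep :: rest =>
    let j := PySem.Chars.rfindFrom text sep pos (some (pos + chunk))
    if j ≠ -1 then j + (sep.length : Int) else pvBestCut text pos chunk rest

-- the while loop of B; fuel text.length + 1 is always enough on Pre_
def pvChunkLoop (fuel : Nat) (key : String) (text : List Char) (chunk ov pos : Int) (seps : List (List Char)) : List (String × Int × Int) :=
  match fuel with
  | 0 => []
  | f+1 =>
    if chunk < (text.length : Int) - pos then
      let c0 := pvBestCut text pos chunk seps
      let cut := if c0 = -1 then pos + chunk else c0
      (key, max 0 (pos - ov), cut + ov) :: pvChunkLoop f key text chunk ov cut seps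
    else [(key, max 0 (pos - ov), (text.length : Int) + ov)]

def generate_split_keys_alt (docs : List (String × String)) (chunk_size : Int) (chunk_overlap : Int) (separators : Option (List String)) : List (String × Int × Int) :=
  let seps := (separators.getD pvSepsDefault).map String.toList
  (PySem.Dict.ofList docs).items.foldl (fun acc p =>
    acc ++ pvChunkLoop (p.2.toList.length + 1) p.1 p.2.toList chunk_size chunk_overlap 0 seps) []

-- ===== PRECONDITION & SPEC =====
-- A raises RecursionError exactly when chunk_size ≤ 0 and some dict value is longer than
-- chunk_size (the recursion then never shrinks the text); Pre_ admits everything else.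
def Pre_generate_split_keys (docs : List (String × String)) (chunk_size : Int) (chunk_overlap : Int) (separators : Option (List String)) : Prop :=
  1 ≤ chunk_size ∨ ∀ p ∈ (PySem.Dict.ofList docs).items, (p.2.toList.length : Int) ≤ chunk_size
instance (docs : List (String × String)) (chunk_size : Int) (chunk_overlap : Int) (separators : Option (List String)) : Decidable (Pre_generate_split_keys docs chunk_size chunk_overlap separators) := by unfold Pre_generate_split_keys; infer_instance

def pvWitness_generate_split_keys : (List (String × String)) × Int × Int × Option (List String) :=
  ([("a", "hello. world"), ("b", "x y")], 5, 1, none)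

def Spec_generate_split_keys (docs : List (String × String)) (chunk_size : Int) (chunk_overlap : Int) (separators : Option (List String)) (out : List (String × Int × Int)) : Prop := out = generate_split_keys_alt docs chunk_size chunk_overlap separators
instance (docs : List (String × String)) (chunk_size : Int) (chunk_overlap : Int) (separators : Option (List String)) (out : List (String × Int × Int)) : Decidable (Spec_generate_split_keys docs chunk_size chunk_overlap separators out) := by unfold Spec_generate_split_keys; infer_instance

-- ===== CLAIM (what is proved, stated in full; the proofs are below) =====
def Claim_equal_generate_split_keys : Prop := ∀ (docs : List (String × String)) (chunk_size : Int) (chunk_overlap : Int) (separators : Option (List String)), Dom_generate_split_keys docs chunk_size chunk_overlap separators → Pre_generate_split_keys docs chunk_size chunk_overlap separators → Spec_generate_split_keys docs chunk_size chunk_overlap separators (generate_split_keys docs chunk_size chunk_overlap separators)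

-- ===== LEMMAS AND PROOFS =====
lemma pvEnumMap {α β : Type} (g : α → β) (l : List α) (s : Int) :
    (PySem.List.enumerate l s).map (fun q => g q.2) = l.map g := by
  induction l generalizing s with
  | nil => simp [PySem.List.enumerate]
  | cons x xs ih => simp [PySem.List.enumerate, ih]

lemma pvRFA (text : List Char) (chunk : Int) (pos : Nat) (sep : List Char)
    (h1 : 1 ≤ chunk) (h2 : chunk < (text.length : Int) - pos) :
    PySem.Chars.rfindFrom (text.drop pos) sep 0 (some chunk) =
      (if PySem.Chars.rfind (List.take chunk.toNat (text.drop pos)) sep = -1 then -1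
       else PySem.Chars.rfind (List.take chunk.toNat (text.drop pos)) sep) := by
  have hn : ((text.drop pos).length : Int) = (text.length : Int) - pos := by
    simp [List.length_drop]; omega
  simp only [PySem.Chars.rfindFrom, hn]
  split_ifs <;> simp_all <;> omega

lemma pvRFB (text : List Char) (chunk : Int) (pos : Nat) (sep : List Char)
    (h1 : 1 ≤ chunk) (h2 : chunk < (text.length : Int) - pos) :
    PySem.Chars.rfindFrom text sep (pos : Int) (some ((pos : Int) + chunk)) =
      (if PySem.Chars.rfind (List.take chunk.toNat (text.drop pos)) sep = -1 then -1
       else (pos : Int) + PySem.Chars.rfind (List.take chunk.toNat (text.drop pos)) sep) := by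
  have ht : ((pos : Int) + chunk).toNat = pos + chunk.toNat := by omega
  have hp : ((pos : Int)).toNat = pos := by omega
  have hdt : List.drop pos (List.take (pos + chunk.toNat) text) = List.take chunk.toNat (List.drop pos text) := by
    rw [List.drop_take]; congr 1; omega
  simp only [PySem.Chars.rfindFrom]
  split_ifs <;> simp_all <;> omega

lemma pvGoNil (s : List Char) : ∀ j : Nat, PySem.Chars.rfind.go s [] j = (j : Int) := by
  intro j; cases j with
  | zero => simp [PySem.Chars.rfind.go]
  | succ j => simp [PySem.Chars.rfind.go]

lemma pvGoSpec (s sub : List Char) : ∀ j : Nat,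
    PySem.Chars.rfind.go s sub j = -1 ∨
    ∃ i : Nat, i ≤ j ∧ PySem.Chars.rfind.go s sub j = (i : Int) ∧ sub <+: s.drop i := by
  intro j
  induction j with
  | zero =>
    by_cases h : sub.isPrefixOf s
    · exact Or.inr ⟨0, le_refl _, by simp [PySem.Chars.rfind.go, h], by simpa using List.isPrefixOf_iff_prefix.mp h⟩
    · exact Or.inl (by simp [PySem.Chars.rfind.go, h])
  | succ j ih =>
    by_cases h : sub.isPrefixOf (s.drop (j+1))
    · exact Or.inr ⟨j+1, le_refl _, by simp [PySem.Chars.rfind.go, h], List.isPrefixOf_iff_prefix.mp h⟩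
    · have hgo : PySem.Chars.rfind.go s sub (j+1) = PySem.Chars.rfind.go s sub j := by
        simp [PySem.Chars.rfind.go, h]
      rcases ih with h1 | ⟨i, hi, he, hp⟩
      · exact Or.inl (hgo.trans h1)
      · exact Or.inr ⟨i, by omega, hgo.trans he, hp⟩

lemma pvBestShift (text : List Char) (chunk : Int) (pos : Nat) (seps : List (List Char))
    (h1 : 1 ≤ chunk) (h2 : chunk < (text.length : Int) - pos) :
    (pvBestSplit (text.drop pos) chunk seps = -1 ∧ pvBestCut text pos chunk seps = -1) ∨
    (∃ b : Int, 1 ≤ b ∧ b ≤ chunk ∧ pvBestSplit (text.drop pos) chunk seps = b ∧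
      pvBestCut text pos chunk seps = (pos : Int) + b) := by
  induction seps with
  | nil => exact Or.inl ⟨rfl, rfl⟩
  | cons sep rest ih =>
    have hlen : (List.take chunk.toNat (text.drop pos)).length = chunk.toNat := by
      simp [List.length_take]; omega
    by_cases hsep : sep = []
    · subst hsep
      have hr : PySem.Chars.rfind (List.take chunk.toNat (text.drop pos)) [] = chunk := by
        simp [PySem.Chars.rfind, pvGoNil, hlen]; omega
      refine Or.inr ⟨chunk, h1, le_refl _, ?_, ?_⟩
      · simp [pvBestSplit, pvRFA text chunk pos [] h1 h2, hr]; omega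
      · simp [pvBestCut, pvRFB text chunk pos [] h1 h2, hr]; omega
    · rcases pvGoSpec (List.take chunk.toNat (text.drop pos)) sep
        (List.take chunk.toNat (text.drop pos)).length with hm1 | ⟨i, hi, he, hp⟩
      · have hr : PySem.Chars.rfind (List.take chunk.toNat (text.drop pos)) sep = -1 := hm1
        rcases ih with ⟨ha, hb⟩ | ⟨b, hb1, hb2, ha, hb⟩
        · refine Or.inl ⟨?_, ?_⟩
          · simpa [pvBestSplit, pvRFA text chunk pos sep h1 h2, hr] using ha
          · simpa [pvBestCut, pvRFB text chunk pos sep h1 h2, hr] using hb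
        · refine Or.inr ⟨b, hb1, hb2, ?_, ?_⟩
          · simpa [pvBestSplit, pvRFA text chunk pos sep h1 h2, hr] using ha
          · simpa [pvBestCut, pvRFB text chunk pos sep h1 h2, hr] using hb
      · have hr : PySem.Chars.rfind (List.take chunk.toNat (text.drop pos)) sep = (i : Int) := he
        have hne : (i : Int) ≠ -1 := by omega
        have hslen : sep.length ≤ chunk.toNat - i := by
          have := hp.length_le
          simp [List.length_drop, hlen] at this
          omega
        have hsep1 : 1 ≤ sep.length := by
          cases sep with
          | nil => exact absurd rfl hsep
          | cons a b => simp
        refine Or.inr ⟨(i : Int) + sep.length, by omega, by omega, ?_, ?_⟩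
        · simp [pvBestSplit, pvRFA text chunk pos sep h1 h2, hr, hne]
        · simp [pvBestCut, pvRFB text chunk pos sep h1 h2, hr, hne]
          omega

lemma pvRecSplitBase (f : Nat) (t : List Char) (maxc : Int) (seps : List (List Char))
    (hf : 1 ≤ f) (h : (t.length : Int) ≤ maxc) :
    pvRecSplit f t maxc seps = [((0:Int), (t.length : Int))] := by
  cases f with
  | zero => omega
  | succ f => simp [pvRecSplit, h]

lemma pvMain (text : List Char) (chunk ov : Int) (key : String) (seps : List (List Char))
    (h1 : 1 ≤ chunk) : ∀ (N pos fA fB : Nat), pos ≤ text.length → text.length - pos ≤ N →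
    N < fA → N < fB →
    pvChunkLoop fB key text chunk ov pos seps =
      (pvRecSplit fA (text.drop pos) chunk seps).map
        (fun p => (key, max 0 ((pos : Int) + p.1 - ov), (pos : Int) + p.2 + ov)) := by
  intro N
  induction N with
  | zero =>
    intro pos fA fB h3 h4 h5 h6
    cases fA with
    | zero => omega
    | succ a =>
      cases fB with
      | zero => omega
      | succ b =>
        have hd : (List.drop pos text).length = text.length - pos := List.length_drop ..
        simp only [pvChunkLoop, pvRecSplit, hd]
        rw [if_neg (by omega), if_pos (by omega)]
        simp only [List.map_cons, List.map_nil, List.cons.injEq, Prod.mk.injEq, true_and, and_true]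
        omega
  | succ N ih =>
    intro pos fA fB h3 h4 h5 h6
    cases fA with
    | zero => omega
    | succ a =>
      cases fB with
      | zero => omega
      | succ b =>
        have hd : (List.drop pos text).length = text.length - pos := List.length_drop ..
        by_cases hc : chunk < (text.length : Int) - pos
        · -- recursive case
          have hbf : ∃ best : Int, 1 ≤ best ∧ best ≤ chunk ∧
              (if pvBestSplit (text.drop pos) chunk seps = -1 then chunk
               else pvBestSplit (text.drop pos) chunk seps) = best ∧
              (if pvBestCut text pos chunk seps = -1 then (pos : Int) + chunk
               else pvBestCut text pos chunk seps) = (pos : Int) + best := by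
            rcases pvBestShift text chunk pos seps h1 hc with ⟨ha, hb⟩ | ⟨bb, hb1, hb2, ha, hb⟩
            · exact ⟨chunk, h1, le_refl _, by simp [ha], by simp [hb]⟩
            · exact ⟨bb, hb1, hb2, by rw [ha, if_neg (by omega)],
                by rw [hb, if_neg (by omega)]⟩
          obtain ⟨best, hbest1, hbest2, hA, hB⟩ := hbf
          have hbn : ((best.toNat : Int)) = best := by omega
          have hlt : (List.take best.toNat (List.drop pos text)).length = best.toNat := by
            simp [List.length_take]; omega
          have hAstep : pvRecSplit (a+1) (text.drop pos) chunk seps =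
              ((0 : Int), best) :: (pvRecSplit a (List.drop best.toNat (List.drop pos text)) chunk seps).map
                (fun p => (p.1 + best, p.2 + best)) := by
            rw [pvRecSplit]
            rw [if_neg (by omega)]
            simp only [hA]
            rw [PySem.List.slice_to _ (by omega), PySem.List.slice_from _ (by omega)]
            rw [pvRecSplitBase a _ chunk seps (by omega) (by rw [hlt]; omega)]
            rw [hlt, hbn, List.singleton_append]
          have hBstep : pvChunkLoop (b+1) key text chunk ov pos seps =
              (key, max 0 ((pos : Int) - ov), (pos : Int) + best + ov) ::
                pvChunkLoop b key text chunk ov ((pos : Int) + best) seps := by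
            rw [pvChunkLoop]
            rw [if_pos (by omega)]
            simp only [hB]
          rw [hAstep, hBstep]
          have hdd : List.drop best.toNat (List.drop pos text) = List.drop (pos + best.toNat) text := by
            rw [List.drop_drop, Nat.add_comm]
          rw [hdd]
          simp only [List.map_cons, List.map_map]
          congr 1
          have hcast : ((pos : Int) + best) = (((pos + best.toNat : Nat)) : Int) := by
            push_cast; omega
          rw [hcast, ih (pos + best.toNat) a b (by omega) (by omega) (by omega) (by omega)]
          apply List.map_congr_left
          intro p _
          simp only [Function.comp_apply, Prod.mk.injEq]
          push_cast
          refine ⟨trivial, by omega, by omega⟩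
        · -- base case
          simp only [pvChunkLoop, pvRecSplit, hd]
          rw [if_neg hc, if_pos (by omega)]
          simp only [List.map_cons, List.map_nil, List.cons.injEq, Prod.mk.injEq, true_and, and_true]
          omega

lemma pvItem (key : String) (text : List Char) (cs co : Int) (seps : List (List Char))
    (h : 1 ≤ cs ∨ (text.length : Int) ≤ cs) :
    pvChunkLoop (text.length + 1) key text cs co 0 seps =
      (pvRecSplit (text.length + 1) text cs seps).map
        (fun p => (key, max 0 (p.1 - co), p.2 + co)) := by
  by_cases h1 : 1 ≤ cs
  · have := pvMain text cs co key seps h1 text.length 0 (text.length+1) (text.length+1)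
      (by omega) (by omega) (by omega) (by omega)
    simpa using this
  · have h2 : (text.length : Int) ≤ cs := by rcases h with h | h; omega; exact h
    rw [pvRecSplitBase (text.length+1) text cs seps (by omega) h2]
    rw [pvChunkLoop, if_neg (by omega)]
    simp

-- ===== VERDICT (by name: the statement is the Claim_ definition above) =====
theorem generate_split_keys_spec : Claim_equal_generate_split_keys := by
  intro docs cs co seps _hdom hpre
  unfold Spec_generate_split_keys generate_split_keys generate_split_keys_alt
  apply PySem.List.foldl_congr_mem
  intro acc p hp
  show acc ++ _ = acc ++ _
  congr 1
  unfold pvSplitText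
  show (PySem.List.enumerate _ _).map _ = _
  rw [pvEnumMap (fun r : Int × Int => (p.1, max 0 (r.1 - co), r.2 + co))]
  refine (pvItem p.1 p.2.toList cs co _ ?_).symm
  rcases hpre with h | h
  · exact Or.inl h
  · exact Or.inr (h p hp)
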